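-- pv_equiv track=rewrite | github.com/MrBrantCode/unitest_baseline | mut_generate/mist_train_taco/taco_11737/solution.py | count_interesting_pairs
-- ===== SOURCE A (Python) =====
-- def count_interesting_pairs(test_cases):
--     results = []
--     for n, l in test_cases:
--         if len(set(l)) == 1:
--             results.append(n * (n - 1))
--         else:
--             max_val = max(l)
--             min_val = min(l)
--             z = l.count(max_val)
--             c = l.count(min_val)
--             results.append(c * z * 2)
--     return results
-- ===== SOURCE B (Python) =====
-- def _run(s):
--     # length of the prefix of s equal to its first element
--     c = 0
--     for x in s:
--         if x != s[0]:
--             break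
--         c += 1
--     return c
--
--
-- def count_interesting_pairs(test_cases):
--     results = []
--     for n, l in test_cases:
--         s = sorted(l)
--         if s[0] == s[-1]:
--             results.append(n * (n - 1))
--         else:
--             results.append(2 * _run(s) * _run(s[::-1]))
--     return results
-- ===== Notes on version B (the rewrite author's own statement) =====
-- stated objective: alternative
-- what changed: Sort-then-scan: B sorts each list, reads min/max as the sorted ends and gets their multiplicities as the lengths of the equal runs at both ends, instead of A's set construction plus max/min and two .count scans.
import Mathlib
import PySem

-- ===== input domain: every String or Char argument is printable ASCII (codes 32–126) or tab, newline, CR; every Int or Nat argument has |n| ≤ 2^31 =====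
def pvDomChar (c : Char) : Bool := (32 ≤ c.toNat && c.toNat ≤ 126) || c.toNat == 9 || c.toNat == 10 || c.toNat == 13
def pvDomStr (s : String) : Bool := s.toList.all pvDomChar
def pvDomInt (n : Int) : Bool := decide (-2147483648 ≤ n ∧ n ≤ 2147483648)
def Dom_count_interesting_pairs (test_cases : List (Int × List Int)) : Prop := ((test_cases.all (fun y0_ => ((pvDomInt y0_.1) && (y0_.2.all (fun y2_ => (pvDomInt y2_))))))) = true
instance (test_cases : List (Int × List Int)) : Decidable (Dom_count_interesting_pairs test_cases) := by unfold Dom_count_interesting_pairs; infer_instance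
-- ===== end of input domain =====

-- B replaces A's per-case set construction plus max/min and two .count scans with
-- sort-then-scan: sort the list, read min/max at the ends, multiplicities = lengths of
-- the equal runs at both ends; objective: alternative algorithm.


-- ===== PORT A =====
def count_interesting_pairs (test_cases : List (Int × List Int)) : List Int :=
  test_cases.foldl (fun results p =>
    let n := p.1
    let l := p.2
    if PySem.Set.len (PySem.Set.ofList l) = 1 then
      results ++ [n * (n - 1)]
    else
      -- max(l)/min(l) raise ValueError on empty l: excluded by Pre_; .getD 0 unreachable there
      let max_val := (PySem.List.max? l (fun y => y)).getD 0
      let min_val := (PySem.List.min? l (fun y => y)).getD 0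
      let z := PySem.List.count l max_val
      let c := PySem.List.count l min_val
      results ++ [(c : Int) * (z : Int) * 2]) []

-- ===== PORT B =====
-- Source B's _run loop: walk s, stop at the first element different from s[0]
def pvRunAux (h : Int) : List Int → Int
  | [] => 0
  | x :: xs => if x ≠ h then 0 else pvRunAux h xs + 1

-- _run(s); s[0] raises IndexError on empty s — never called on [] by B (Pre_)
def pvRun (s : List Int) : Int :=
  match s with
  | [] => 0
  | h :: _ => pvRunAux h s

def count_interesting_pairs_alt (test_cases : List (Int × List Int)) : List Int :=
  test_cases.foldl (fun results p =>
    let n := p.1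
    let s := PySem.List.sorted p.2 (fun y => y) false
    -- s[0]/s[-1] raise IndexError on empty l: excluded by Pre_; .getD 0 unreachable there
    if (PySem.List.pyGet? s 0).getD 0 = (PySem.List.pyGet? s (-1)).getD 0 then
      results ++ [n * (n - 1)]
    else
      -- s[::-1] = reverse (PySem.List.slice?_none_none_neg_one)
      results ++ [2 * pvRun s * pvRun ((PySem.List.slice? s none none (-1)).getD [])]) []

-- ===== PRECONDITION & SPEC =====
-- Pre_ excludes test cases with an empty value list, on which both Pythons raise
-- (A: ValueError from max([]), B: IndexError from s[0]).
def Pre_count_interesting_pairs (test_cases : List (Int × List Int)) : Prop :=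
  ∀ p ∈ test_cases, p.2 ≠ []
instance (test_cases : List (Int × List Int)) : Decidable (Pre_count_interesting_pairs test_cases) := by unfold Pre_count_interesting_pairs; infer_instance
def pvWitness_count_interesting_pairs : (List (Int × List Int)) :=
  [(3, [1, 2, 2]), (2, [5, 5])]

def Spec_count_interesting_pairs (test_cases : List (Int × List Int)) (out : List Int) : Prop := out = count_interesting_pairs_alt test_cases
instance (test_cases : List (Int × List Int)) (out : List Int) : Decidable (Spec_count_interesting_pairs test_cases out) := by unfold Spec_count_interesting_pairs; infer_instance

-- ===== CLAIM (what is proved, stated in full; the proofs are below) =====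
def Claim_equal_count_interesting_pairs : Prop := ∀ (test_cases : List (Int × List Int)), Dom_count_interesting_pairs test_cases → Pre_count_interesting_pairs test_cases → Spec_count_interesting_pairs test_cases (count_interesting_pairs test_cases)

-- ===== LEMMAS AND PROOFS =====

-- the run length at the head of a list in which an element equal to m can only be
-- preceded by elements equal to m is the full count of m
lemma pvRunAux_eq_count (m : Int) (s : List Int)
    (hp : s.Pairwise (fun a b => b = m → a = m)) :
    pvRunAux m s = (s.count m : Int) := by
  induction s with
  | nil => simp [pvRunAux]
  | cons x xs ih =>
    rcases List.pairwise_cons.mp hp with ⟨hx, ht⟩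
    by_cases hxm : x = m
    · subst hxm
      simp only [pvRunAux, ne_eq, not_true_eq_false, if_false, ih ht,
        List.count_cons_self]
      push_cast; ring
    · have hnm : xs.count m = 0 := by
        rw [List.count_eq_zero]
        intro hmem
        exact hxm (hx m hmem rfl)
      simp [pvRunAux, hxm, hnm]

lemma pvOfList_all_eq (xs : List Int) (a : Int) (h : ∀ y ∈ xs, y = a) :
    xs.foldl PySem.Set.add [a] = [a] := by
  induction xs with
  | nil => rfl
  | cons x xs ih =>
    have hx : x = a := h x (by simp)
    have hadd : PySem.Set.add [a] x = [a] := by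
      subst hx; simp [PySem.Set.add, PySem.Set.contains]
    simp only [List.foldl_cons, hadd]
    exact ih (fun y hy => h y (by simp [hy]))

-- len(set(l)) == 1 iff min(l) == max(l), for nonempty l = x :: xs
lemma pvSet_len_iff (x : Int) (xs : List Int) :
    PySem.Set.len (PySem.Set.ofList (x :: xs)) = 1 ↔
      xs.foldl min x = xs.foldl max x := by
  have hmin := PySem.List.min?_id_cons x xs
  have hmax := PySem.List.max?_id_cons x xs
  have hmnmem : xs.foldl min x ∈ x :: xs := PySem.List.min?_mem hmin
  have hmxmem : xs.foldl max x ∈ x :: xs := PySem.List.max?_mem hmax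
  have hmnlo : ∀ y ∈ x :: xs, xs.foldl min x ≤ y := PySem.List.min?_isMin hmin
  have hmxhi : ∀ y ∈ x :: xs, y ≤ xs.foldl max x := PySem.List.max?_isMax hmax
  constructor
  · intro hlen
    have hlen' : (PySem.Set.ofList (x :: xs)).length = 1 := by
      simpa [PySem.Set.len] using hlen
    obtain ⟨a, ha⟩ := List.length_eq_one_iff.mp hlen'
    have hall : ∀ y ∈ x :: xs, y = a := by
      intro y hy
      have := (PySem.Set.mem_ofList (x :: xs) y).mpr hy
      rw [ha] at this; simpa using this
    rw [hall _ hmnmem, hall _ hmxmem]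
  · intro heq
    have hall : ∀ y ∈ x :: xs, y = x := by
      intro y hy
      have h1 := hmnlo y hy
      have h2 := hmxhi y hy
      have h3 := hmnlo x (by simp)
      have h4 := hmxhi x (by simp)
      omega
    have hof : PySem.Set.ofList (x :: xs) = [x] := by
      have h0 : PySem.Set.ofList (x :: xs) = xs.foldl PySem.Set.add [x] := by
        simp [PySem.Set.ofList_eq_foldl, PySem.Set.add, PySem.Set.contains]
      rw [h0, pvOfList_all_eq xs x (fun y hy => hall y (by simp [hy]))]
    simp [hof, PySem.Set.len]

-- s[-1] of a nonempty list is the head of its reverse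
lemma pvPyGet_neg_one (s : List Int) (hs : s ≠ []) :
    PySem.List.pyGet? s (-1) = s.reverse.head? := by
  have h1 : 1 ≤ s.length := List.length_pos_iff.mpr hs
  simp [PySem.List.pyGet?, PySem.List.pyIdx?, h1, List.getLast?_eq_getElem?]

-- per-test-case core: A's branch and appended value coincide with B's on a nonempty list
lemma pvCase_eq (n x : Int) (xs : List Int) (acc : List Int) :
    (if PySem.Set.len (PySem.Set.ofList (x :: xs)) = 1 then
       acc ++ [n * (n - 1)]
     else
       acc ++ [((PySem.List.count (x :: xs) ((PySem.List.min? (x :: xs) (fun y => y)).getD 0) : Int)) *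
         ((PySem.List.count (x :: xs) ((PySem.List.max? (x :: xs) (fun y => y)).getD 0) : Int)) * 2]) =
    (let s := PySem.List.sorted (x :: xs) (fun y => y) false
     if (PySem.List.pyGet? s 0).getD 0 = (PySem.List.pyGet? s (-1)).getD 0 then
       acc ++ [n * (n - 1)]
     else
       acc ++ [2 * pvRun s * pvRun ((PySem.List.slice? s none none (-1)).getD [])]) := by
  set l := x :: xs with hl
  set s := PySem.List.sorted l (fun y => y) false with hsdef
  have hsne : s ≠ [] := by
    rw [hsdef, Ne, PySem.List.sorted_eq_nil_iff]; simp [hl]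
  obtain ⟨m, t, hst⟩ := List.exists_cons_of_ne_nil hsne
  have hperm : s.Perm l := PySem.List.sorted_perm l (fun y => y) false
  have hpw : s.Pairwise (fun a b => a ≤ b) := PySem.List.sorted_pairwise l (fun y => y)
  have hmem_s : ∀ y, y ∈ s ↔ y ∈ l := fun y => hperm.mem_iff
  have hm_le : ∀ y ∈ l, m ≤ y := by
    have := PySem.List.key_head_sorted_le (xs := l) (key := fun y => y) (hsdef ▸ hst)
    simpa using this
  have hm_mem : m ∈ l := (hmem_s m).mp (by simp [hst])
  -- the reversed sorted list
  set r := s.reverse with hrdef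
  have hrne : r ≠ [] := by simpa [hrdef] using hsne
  obtain ⟨m2, t2, hrt⟩ := List.exists_cons_of_ne_nil hrne
  have hmem_r : ∀ y, y ∈ r ↔ y ∈ l := by
    intro y; rw [hrdef, List.mem_reverse]; exact hmem_s y
  have hr_pw : r.Pairwise (fun a b => b ≤ a) := by
    rw [hrdef, List.pairwise_reverse]; exact hpw
  have hm2_ge : ∀ y ∈ l, y ≤ m2 := by
    intro y hy
    rcases (hmem_r y).mpr hy with hy'
    rw [hrt] at hy'
    rcases List.mem_cons.mp hy' with h | h
    · exact le_of_eq (h ▸ rfl)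
    · exact (List.pairwise_cons.mp (hrt ▸ hr_pw)).1 y h
  have hm2_mem : m2 ∈ l := (hmem_r m2).mp (by simp [hrt])
  -- min and max of l as A computes them
  have hmin : (PySem.List.min? l fun y => y) = some (xs.foldl min x) := by
    rw [hl]; exact PySem.List.min?_id_cons x xs
  have hmax : (PySem.List.max? l fun y => y) = some (xs.foldl max x) := by
    rw [hl]; exact PySem.List.max?_id_cons x xs
  have hMmem : xs.foldl min x ∈ l := PySem.List.min?_mem hmin
  have hXmem : xs.foldl max x ∈ l := PySem.List.max?_mem hmax
  have hMlo : ∀ y ∈ l, xs.foldl min x ≤ y := PySem.List.min?_isMin hmin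
  have hXhi : ∀ y ∈ l, y ≤ xs.foldl max x := PySem.List.max?_isMax hmax
  have hmM : m = xs.foldl min x :=
    le_antisymm (hm_le _ hMmem) (hMlo m hm_mem)
  have hm2X : m2 = xs.foldl max x :=
    le_antisymm (hXhi m2 hm2_mem) (hm2_ge _ hXmem)
  -- B's two indexings
  have hget0 : PySem.List.pyGet? s 0 = some m := by
    rw [hst]; simp [PySem.List.pyGet?, PySem.List.pyIdx?]
  have hgetlast : PySem.List.pyGet? s (-1) = some m2 := by
    rw [pvPyGet_neg_one s hsne, ← hrdef, hrt]; rfl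
  -- the branch conditions agree
  have hcond : (PySem.Set.len (PySem.Set.ofList l) = 1) ↔
      ((PySem.List.pyGet? s 0).getD 0 = (PySem.List.pyGet? s (-1)).getD 0) := by
    rw [hget0, hgetlast]
    simp only [Option.getD_some]
    rw [hl, pvSet_len_iff, ← hmM, ← hm2X]
  -- run lengths are the counts
  have hrun_s : pvRun s = (l.count m : Int) := by
    rw [hst, pvRun, pvRunAux_eq_count]
    · exact congrArg Nat.cast ((hst ▸ hperm : (m :: t).Perm l).count_eq m)
    · refine (hst ▸ hpw).imp_of_mem ?_
      intro a b ha hb hab hbm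
      have ham : m ≤ a := hm_le a ((hmem_s a).mp (hst ▸ ha))
      omega
  have hrun_r : pvRun r = (l.count m2 : Int) := by
    rw [hrt, pvRun, pvRunAux_eq_count]
    · have hrp : (m2 :: t2).Perm l := hrt ▸ ((List.reverse_perm s).trans hperm)
      exact congrArg Nat.cast (hrp.count_eq m2)
    · refine (hrt ▸ hr_pw).imp_of_mem ?_
      intro a b ha hb hab hbm
      have ham : a ≤ m2 := hm2_ge a ((hmem_r a).mp (hrt ▸ ha))
      omega
  have hslice : (PySem.List.slice? s none none (-1)).getD [] = r := by
    rw [PySem.List.slice?_none_none_neg_one]; rfl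
  -- put the pieces together
  simp only [hmin, hmax, Option.getD_some, PySem.List.count_eq]
  by_cases hc : PySem.Set.len (PySem.Set.ofList l) = 1
  · rw [if_pos hc, if_pos (hcond.mp hc)]
  · rw [if_neg hc, if_neg (fun h => hc (hcond.mpr h)), hslice, hrun_s, hrun_r,
      ← hmM, ← hm2X]
    congr 1
    simp only [List.cons.injEq, and_true]
    ring

-- ===== VERDICT (by name: the statement is the Claim_ definition above) =====
theorem count_interesting_pairs_spec : Claim_equal_count_interesting_pairs := by
  intro tcs _hdom hpre
  unfold Spec_count_interesting_pairs count_interesting_pairs count_interesting_pairs_alt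
  refine PySem.List.foldl_congr_mem tcs _ _ [] ?_
  intro acc p hp
  obtain ⟨n, l⟩ := p
  match l with
  | [] => exact absurd rfl (hpre (n, []) hp)
  | x :: xs =>
    dsimp only
    exact pvCase_eq n x xs acc
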